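-- pv_equiv track=rewrite | github.com/tmfrlrkvlek/algorithm_python | Programmers/Python/64061.py | solution
-- ===== SOURCE A (Python) =====
-- def solution(board, moves):
--     conv_board = [[] for _ in range(len(board))]
--     [[conv_board[num].append(line[num]) for num in range(len(board)) if line[num] != 0] for line in board[::-1]]
--     stack = []
--     result = 0
--     for move in moves :
--         if conv_board[move-1] :
--             doll = conv_board[move-1].pop()
--             if stack and doll == stack[-1]:
--                 result += 2
--                 stack = stack[:-1]
--             else :
--                 stack.append(doll)
--     return result
-- ===== SOURCE B (Python) =====
-- def solution(board, moves):
--     n = len(board)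
--     grid = [row[:n] for row in board]
--     stack = []
--     result = 0
--     for move in moves:
--         for row in grid:
--             if row[move-1] != 0:
--                 doll = row[move-1]
--                 row[move-1] = 0
--                 if stack and stack[-1] == doll:
--                     result += 2
--                     stack.pop()
--                 else:
--                     stack.append(doll)
--                 break
--     return result
-- ===== Notes on version B (the rewrite author's own statement) =====
-- stated objective: alternative
-- what changed: B drops A's pre-built per-column stacks (built by a double comprehension over the reversed board) and instead scans a copy of the n-column grid top-down per move, zeroing the popped cell in place.
import Mathlib
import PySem

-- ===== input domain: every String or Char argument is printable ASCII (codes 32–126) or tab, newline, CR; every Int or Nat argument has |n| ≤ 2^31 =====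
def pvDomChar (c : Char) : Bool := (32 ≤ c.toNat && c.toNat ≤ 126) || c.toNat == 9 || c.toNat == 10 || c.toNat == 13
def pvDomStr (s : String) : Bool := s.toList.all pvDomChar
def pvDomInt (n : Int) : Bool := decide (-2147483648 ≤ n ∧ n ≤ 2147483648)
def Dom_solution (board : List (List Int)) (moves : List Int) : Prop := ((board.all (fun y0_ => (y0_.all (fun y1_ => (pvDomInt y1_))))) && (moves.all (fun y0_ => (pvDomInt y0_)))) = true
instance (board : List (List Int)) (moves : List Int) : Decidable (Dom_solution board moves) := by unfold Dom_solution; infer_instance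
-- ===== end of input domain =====

-- B replaces A's pre-built per-column stacks by an in-place top-down scan of a copied grid (alternative decomposition, same cost class).

-- ===== PORT A =====
-- inner comprehension: for num in range(k): if line[num] != 0: conv_board[num].append(line[num])
def appendColAux (line : List Int) (cv : List (List Int)) (k : Nat) : List (List Int) :=
  (List.range k).foldl
    (fun cv num =>
      if line.getD num 0 ≠ 0 then cv.modify num (fun col => col ++ [line.getD num 0]) else cv)
    cv

-- body of A's `for move in moves` loop; state = (conv_board, stack, result)
def stepA (n : Nat) (st : List (List Int) × List Int × Int) (move : Int) :
    List (List Int) × List Int × Int :=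
  let j := (if move - 1 < 0 then move - 1 + (n : Int) else move - 1).toNat
  let col := st.1.getD j []
  if col ≠ [] then
    let doll := col.getLastD 0
    let cv' := st.1.modify j List.dropLast
    if st.2.1 ≠ [] ∧ doll = st.2.1.getLastD 0 then (cv', st.2.1.dropLast, st.2.2 + 2)
    else (cv', st.2.1 ++ [doll], st.2.2)
  else st

def solution (board : List (List Int)) (moves : List Int) : Int :=
  let n := board.length
  let conv := board.reverse.foldl (fun cv line => appendColAux line cv n) (List.replicate n [])
  (moves.foldl (stepA n) (conv, [], 0)).2.2

-- ===== PORT B =====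
-- scan the rows top-down for the first nonzero cell of the move's column; zero it
def popCol : List (List Int) → Int → List (List Int) × Option Int
  | [], _ => ([], none)
  | row :: rest, move =>
    let j := (if move - 1 < 0 then move - 1 + (row.length : Int) else move - 1).toNat
    if row.getD j 0 ≠ 0 then (row.set j 0 :: rest, some (row.getD j 0))
    else
      let r := popCol rest move
      (row :: r.1, r.2)

-- body of B's `for move in moves` loop; state = (grid, stack, result)
def stepB (st : List (List Int) × List Int × Int) (move : Int) :
    List (List Int) × List Int × Int :=
  match popCol st.1 move with
  | (grid', some doll) =>
      if st.2.1 ≠ [] ∧ st.2.1.getLastD 0 = doll then (grid', st.2.1.dropLast, st.2.2 + 2)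
      else (grid', st.2.1 ++ [doll], st.2.2)
  | (_, none) => st

def solution_alt (board : List (List Int)) (moves : List Int) : Int :=
  let n := board.length
  let grid := board.map (fun row => row.take n)   -- row[:n] (slice with nonnegative bound = take)
  (moves.foldl stepB (grid, [], 0)).2.2

-- ===== PRECONDITION & SPEC =====
-- Pre_ excludes exactly the inputs where A raises IndexError: a row shorter than the board (read by A's
-- column-building comprehension) or a move outside the range Python accepts for indexing the board's columns.
def Pre_solution (board : List (List Int)) (moves : List Int) : Prop :=
  (∀ row ∈ board, board.length ≤ row.length) ∧
  (∀ m ∈ moves, 1 - (board.length : Int) ≤ m ∧ m ≤ (board.length : Int))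
instance (board : List (List Int)) (moves : List Int) : Decidable (Pre_solution board moves) := by
  unfold Pre_solution; infer_instance

def pvWitness_solution : List (List Int) × List Int := ([[0, 3], [1, 3]], [1, 2, 2])

def Spec_solution (board : List (List Int)) (moves : List Int) (out : Int) : Prop := out = solution_alt board moves
instance (board : List (List Int)) (moves : List Int) (out : Int) : Decidable (Spec_solution board moves out) := by unfold Spec_solution; infer_instance

-- ===== CLAIM (what is proved, stated in full; the proofs are below) =====
def Claim_equal_solution : Prop := ∀ (board : List (List Int)) (moves : List Int), Dom_solution board moves → Pre_solution board moves → Spec_solution board moves (solution board moves)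

-- ===== LEMMAS AND PROOFS =====

-- column c of a grid, read through getD (cells past a row's end read as 0; Pre_ rules those out for c < n)
def colOf (grid : List (List Int)) (c : Nat) : List Int := grid.map (fun r => r.getD c 0)

-- invariant tying A's conv_board to B's grid
def InvAB (n : Nat) (cv grid : List (List Int)) : Prop :=
  cv.length = n ∧ (∀ r ∈ grid, r.length = n) ∧
  ∀ c < n, cv.getD c [] = ((colOf grid c).filter (fun v => v != 0)).reverse


theorem getD_modify_ne (l : List (List Int)) (i j : Nat) (f : List Int → List Int) (h : i ≠ j) :
    (l.modify i f).getD j [] = l.getD j [] := by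
  rw [List.getD_eq_getElem?_getD, List.getElem?_modify, List.getD_eq_getElem?_getD]
  cases l[j]? <;> simp [h]

theorem getD_modify_self (l : List (List Int)) (i : Nat) (f : List Int → List Int) (h : i < l.length) :
    (l.modify i f).getD i [] = f (l.getD i []) := by
  rw [List.getD_eq_getElem?_getD, List.getElem?_modify, List.getElem?_eq_getElem h]
  simp [List.getElem?_eq_getElem h]

theorem appendColAux_succ (line : List Int) (cv : List (List Int)) (k : Nat) :
    appendColAux line cv (k + 1) =
      (if line.getD k 0 ≠ 0 then (appendColAux line cv k).modify k (fun col => col ++ [line.getD k 0])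
       else appendColAux line cv k) := by
  simp [appendColAux, List.range_succ]

theorem appendColAux_length (line : List Int) (cv : List (List Int)) (k : Nat) :
    (appendColAux line cv k).length = cv.length := by
  induction k with
  | zero => rfl
  | succ k ih => rw [appendColAux_succ]; split <;> simp [List.length_modify, ih]

theorem appendColAux_getD_ge (line : List Int) (cv : List (List Int)) (k c : Nat) (h : k ≤ c) :
    (appendColAux line cv k).getD c [] = cv.getD c [] := by
  induction k with
  | zero => rfl
  | succ k ih =>
    rw [appendColAux_succ]
    have hk : k ≤ c := Nat.le_of_succ_le h
    have hne : k ≠ c := by omega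
    split
    · rw [getD_modify_ne _ _ _ _ hne]; exact ih hk
    · exact ih hk

theorem appendColAux_getD (line : List Int) (cv : List (List Int)) (k c : Nat)
    (hc : c < k) (hcv : c < cv.length) :
    (appendColAux line cv k).getD c [] =
      cv.getD c [] ++ (if line.getD c 0 ≠ 0 then [line.getD c 0] else []) := by
  induction k with
  | zero => omega
  | succ k ih =>
    rw [appendColAux_succ]
    by_cases hck : c < k
    · have hne : k ≠ c := by omega
      split
      · rw [getD_modify_ne _ _ _ _ hne]; exact ih hck
      · exact ih hck
    · have hkc : k = c := by omega
      subst hkc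
      have hlen : k < (appendColAux line cv k).length := by rw [appendColAux_length]; exact hcv
      have hbase := appendColAux_getD_ge line cv k k le_rfl
      split
      · rw [getD_modify_self _ _ _ hlen, hbase]
      · rw [hbase]; simp

theorem build_length (lines cv : List (List Int)) (n : Nat) :
    (lines.foldl (fun cv line => appendColAux line cv n) cv).length = cv.length := by
  induction lines generalizing cv with
  | nil => rfl
  | cons l ls ih => simp [List.foldl_cons, ih, appendColAux_length]

theorem build_getD (lines cv : List (List Int)) (n c : Nat) (hc : c < n) (hcv : c < cv.length) :
    (lines.foldl (fun cv line => appendColAux line cv n) cv).getD c [] =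
      cv.getD c [] ++ (lines.map (fun l => l.getD c 0)).filter (fun v => v != 0) := by
  induction lines generalizing cv with
  | nil => simp
  | cons l ls ih =>
    rw [List.foldl_cons, ih _ (by rw [appendColAux_length]; exact hcv),
      appendColAux_getD l cv n c hc hcv]
    by_cases h : l.getD c 0 = 0 <;>
      simp only [List.getD_eq_getElem?_getD] at h <;>
      simp [List.filter_cons, List.getD_eq_getElem?_getD, h]

theorem colOf_cons (r : List Int) (l : List (List Int)) (c : Nat) :
    colOf (r :: l) c = r.getD c 0 :: colOf l c := rfl

-- the Python index `move-1` resolved against a length-n list (negative values wrap)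
def pvJ (n : Nat) (move : Int) : Nat := (if move - 1 < 0 then move - 1 + (n : Int) else move - 1).toNat

theorem getD_ne_zero_lt {row : List Int} {j : Nat} (h : row.getD j 0 ≠ 0) : j < row.length := by
  by_contra hge
  exact h (List.getD_eq_default _ _ (by omega))

theorem popCol_spec (grid : List (List Int)) (move : Int) (n : Nat)
    (hrow : ∀ r ∈ grid, r.length = n) :
    (popCol grid move).2 = ((colOf grid (pvJ n move)).filter (fun v => v != 0)).head? ∧
    (popCol grid move).1.map List.length = grid.map List.length ∧
    (∀ c, c ≠ pvJ n move → colOf (popCol grid move).1 c = colOf grid c) ∧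
    ((colOf (popCol grid move).1 (pvJ n move)).filter (fun v => v != 0) =
      ((colOf grid (pvJ n move)).filter (fun v => v != 0)).tail) := by
  induction grid with
  | nil => simp [popCol, colOf]
  | cons row rest ih =>
    have hj : (if move - 1 < 0 then move - 1 + (row.length : Int) else move - 1).toNat
        = pvJ n move := by
      rw [hrow row List.mem_cons_self]; rfl
    set j := pvJ n move with hjdef
    obtain ⟨ih1, ih2, ih3, ih4⟩ := ih fun r hr => hrow r (List.mem_cons_of_mem _ hr)
    by_cases hv : row.getD j 0 ≠ 0
    · have hjlt : j < row.length := getD_ne_zero_lt hv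
      have hv' : (row.getD j 0 != 0) = true := by simpa using hv
      have hstep : popCol (row :: rest) move = (row.set j 0 :: rest, some (row.getD j 0)) := by
        simp only [popCol]
        rw [hj, if_pos hv]
      have hset : (row.set j 0).getD j 0 = 0 := by
        rw [List.getD_eq_getElem?_getD, List.getElem?_set, if_pos rfl, if_pos hjlt]; rfl
      refine ⟨?_, ?_, ?_, ?_⟩
      · rw [hstep, colOf_cons, List.filter_cons, if_pos hv']
        rfl
      · rw [hstep]; simp
      · intro c hc
        have hsetc : (row.set j 0).getD c 0 = row.getD c 0 := by
          rw [List.getD_eq_getElem?_getD, List.getElem?_set_ne (Ne.symm hc), List.getD_eq_getElem?_getD]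
        rw [hstep, colOf_cons, colOf_cons, hsetc]
      · rw [hstep, colOf_cons, colOf_cons, hset, List.filter_cons, List.filter_cons, if_pos hv']
        simp
    · have hv : row.getD j 0 = 0 := not_ne_iff.mp hv
      have hstep : popCol (row :: rest) move = (row :: (popCol rest move).1, (popCol rest move).2) := by
        simp only [popCol]
        rw [hj, if_neg (not_ne_iff.mpr hv)]
      refine ⟨?_, ?_, ?_, ?_⟩
      · rw [hstep, colOf_cons, List.filter_cons, if_neg (by simpa [List.getD_eq_getElem?_getD] using hv)]
        exact ih1
      · rw [hstep]; simp [ih2]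
      · intro c hc
        rw [hstep, colOf_cons, colOf_cons, ih3 c hc]
      · rw [hstep, colOf_cons, colOf_cons, List.filter_cons, List.filter_cons,
          if_neg (by simpa [List.getD_eq_getElem?_getD] using hv), if_neg (by simpa [List.getD_eq_getElem?_getD] using hv)]
        exact ih4

theorem steps_eq (moves : List Int) (cv grid : List (List Int)) (stack : List Int) (res : Int)
    (n : Nat) (hInv : InvAB n cv grid) (hm : ∀ m ∈ moves, 1 - (n : Int) ≤ m ∧ m ≤ (n : Int)) :
    (moves.foldl (stepA n) (cv, stack, res)).2 = (moves.foldl stepB (grid, stack, res)).2 := by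
  induction moves generalizing cv grid stack res with
  | nil => rfl
  | cons move ms ih =>
    obtain ⟨hlen, hrows, hcols⟩ := hInv
    obtain ⟨hm1, hmn⟩ := hm move (List.mem_cons_self)
    have hmrest : ∀ m ∈ ms, 1 - (n : Int) ≤ m ∧ m ≤ (n : Int) := fun m h => hm m (List.mem_cons_of_mem _ h)
    set j := pvJ n move with hjdef
    have hjn : j < n := by rw [hjdef]; unfold pvJ; split <;> omega
    have hjA : (if move - 1 < 0 then move - 1 + (n : Int) else move - 1).toNat = j := by
      rw [hjdef]; rfl
    obtain ⟨hp1, hp2, hp3, hp4⟩ := popCol_spec grid move n hrows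
    have hcol : cv.getD j [] = ((colOf grid j).filter (fun v => v != 0)).reverse := hcols j hjn
    rw [List.foldl_cons, List.foldl_cons]
    by_cases hemp : (colOf grid j).filter (fun v => v != 0) = []
    · -- empty column: both skip
      have hA : stepA n (cv, stack, res) move = (cv, stack, res) := by
        simp only [stepA, hjA]
        rw [if_neg (not_ne_iff.mpr (by rw [hcol, hemp]; simp))]
      have hB : stepB (grid, stack, res) move = (grid, stack, res) := by
        have : (popCol grid move).2 = none := by rw [hp1, hemp]; rfl
        simp [stepB]
        rcases hpc : popCol grid move with ⟨g', d⟩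
        rw [hpc] at this; simp at this; subst this; rfl
      rw [hA, hB]
      exact ih cv grid stack res ⟨hlen, hrows, hcols⟩ hmrest
    · obtain ⟨d, t, hdt⟩ := List.exists_cons_of_ne_nil hemp
      have hsome : (popCol grid move).2 = some d := by rw [hp1, hdt]; rfl
      rcases hpc : popCol grid move with ⟨g', dd⟩
      rw [hpc] at hsome hp2 hp3 hp4
      simp at hsome; subst hsome
      -- A's doll
      have hdoll : (cv.getD j []).getLastD 0 = d := by
        rw [hcol, hdt]
        have : (d :: t).reverse = t.reverse ++ [d] := by simp
        rw [this]
        simp [List.getLastD_eq_getLast?]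
      have hne : cv.getD j [] ≠ [] := by rw [hcol, hdt]; simp
      -- the new invariant
      have hInv' : InvAB n (cv.modify j List.dropLast) g' := by
        refine ⟨by simp [List.length_modify, hlen], ?_, ?_⟩
        · intro r hr
          have : r.length ∈ g'.map List.length := List.mem_map_of_mem hr
          rw [hp2] at this
          obtain ⟨r0, hr0, hr0l⟩ := List.mem_map.mp this
          rw [← hr0l]; exact hrows r0 hr0
        · intro c hcn
          by_cases hcj : c = j
          · have hlt : j < cv.length := by omega
            rw [hcj, getD_modify_self _ _ _ hlt, hcols j hjn, hp4, hdt]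
            simp
          · rw [getD_modify_ne _ _ _ _ (Ne.symm hcj), hcols c hcn, hp3 c hcj]
      -- both take the same branch and produce equal stack/result
      by_cases hbr : stack ≠ [] ∧ stack.getLastD 0 = d
      · have hA : stepA n (cv, stack, res) move = (cv.modify j List.dropLast, stack.dropLast, res + 2) := by
          simp only [stepA, hjA]
          rw [if_pos hne, if_pos ⟨hbr.1, by rw [hdoll, hbr.2]⟩]
        have hB : stepB (grid, stack, res) move = (g', stack.dropLast, res + 2) := by
          simp only [stepB, hpc]
          rw [if_pos hbr]
        rw [hA, hB]; exact ih _ _ _ _ hInv' hmrest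
      · have hbr' : ¬(stack ≠ [] ∧ (cv.getD j []).getLastD 0 = stack.getLastD 0) := by
          rw [hdoll]; intro ⟨h1, h2⟩; exact hbr ⟨h1, h2.symm⟩
        have hA : stepA n (cv, stack, res) move = (cv.modify j List.dropLast, stack ++ [d], res) := by
          simp only [stepA, hjA]
          rw [if_pos hne, if_neg hbr', hdoll]
        have hB : stepB (grid, stack, res) move = (g', stack ++ [d], res) := by
          simp only [stepB, hpc]
          rw [if_neg hbr]
        rw [hA, hB]; exact ih _ _ _ _ hInv' hmrest

theorem getD_take_of_lt (row : List Int) (n c : Nat) (h : c < n) :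
    (row.take n).getD c 0 = row.getD c 0 := by
  rw [List.getD_eq_getElem?_getD, List.getElem?_take, if_pos h, List.getD_eq_getElem?_getD]

theorem build_inv (board : List (List Int)) (hrows : ∀ row ∈ board, board.length ≤ row.length) :
    InvAB board.length
      (board.reverse.foldl (fun cv line => appendColAux line cv board.length)
        (List.replicate board.length []))
      (board.map (fun row => row.take board.length)) := by
  refine ⟨by rw [build_length]; simp, ?_, ?_⟩
  · intro r hr
    obtain ⟨r0, hr0, hr0l⟩ := List.mem_map.mp hr
    rw [← hr0l, List.length_take]
    exact Nat.min_eq_left (hrows r0 hr0)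
  · intro c hcn
    rw [build_getD _ _ _ c hcn (by simpa using hcn)]
    have hcol : colOf (board.map (fun row => row.take board.length)) c = colOf board c := by
      unfold colOf
      rw [List.map_map]
      exact List.map_congr_left fun r _ => getD_take_of_lt r board.length c hcn
    rw [hcol]
    simp [colOf, List.filter_reverse, List.map_reverse]

-- ===== VERDICT (by name: the statement is the Claim_ definition above) =====
theorem solution_spec : Claim_equal_solution := by
  intro board moves _ hpre
  obtain ⟨hrows, hm⟩ := hpre
  show solution board moves = solution_alt board moves
  have h := steps_eq moves
      (board.reverse.foldl (fun cv line => appendColAux line cv board.length)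
        (List.replicate board.length []))
      (board.map (fun row => row.take board.length))
      [] 0 board.length (build_inv board hrows) hm
  exact congrArg Prod.snd h
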